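-- pv_equiv track=rewrite | github.com/Markus-Teichmann/WA-Selenium | src/utils.py | assign_state
-- ===== SOURCE A (Python) =====
-- relevant_tags = {
--     "JL Mitglied": "mitglied",
--     "JL Kontaktformular": "interessiert",
--     "JL Kontakt Freundeskreis": "interessiert",
--     "JL Mitmachen": "interessiert",
--     "JL Lernnetz": "lernnetz"
-- }
--
-- def assign_state(tags):
--     tag_set = [tag for tag in tags if tag in relevant_tags.keys() and relevant_tags[tag] == "mitglied"]
--     if len(tag_set) != 0:
--         return "mitglied"
--     tag_set = [tag for tag in tags if tag in relevant_tags.keys() and relevant_tags[tag] == "interessiert"]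
--     if len(tag_set) != 0:
--         return "interessiert"
--     return "sonstiges"
-- ===== SOURCE B (Python) =====
-- relevant_tags = {
--     "JL Mitglied": "mitglied",
--     "JL Kontaktformular": "interessiert",
--     "JL Kontakt Freundeskreis": "interessiert",
--     "JL Mitmachen": "interessiert",
--     "JL Lernnetz": "lernnetz"
-- }
--
-- def assign_state(tags):
--     # one pass: collect the membership states present, then a fixed priority check
--     states = set()
--     for tag in tags:
--         if tag in relevant_tags:
--             states.add(relevant_tags[tag])
--     if "mitglied" in states:
--         return "mitglied"
--     if "interessiert" in states:
--         return "interessiert"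
--     return "sonstiges"
-- ===== Notes on version B (the rewrite author's own statement) =====
-- stated objective: simpler
-- what changed: Replaces A's two full list-comprehension scans (one per state) by a single pass that collects the set of states present, followed by a fixed-shape priority check.
import Mathlib
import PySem

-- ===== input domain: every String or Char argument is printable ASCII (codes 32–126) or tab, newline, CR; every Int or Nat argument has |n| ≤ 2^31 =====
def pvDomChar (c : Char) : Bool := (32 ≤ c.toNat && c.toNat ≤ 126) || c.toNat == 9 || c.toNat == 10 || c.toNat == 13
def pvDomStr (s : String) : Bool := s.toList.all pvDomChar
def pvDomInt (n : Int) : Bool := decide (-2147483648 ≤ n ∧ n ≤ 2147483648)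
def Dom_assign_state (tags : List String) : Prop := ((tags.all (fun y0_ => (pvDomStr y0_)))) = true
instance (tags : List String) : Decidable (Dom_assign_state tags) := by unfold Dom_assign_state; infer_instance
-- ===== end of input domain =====

-- B collapses A's two repeated scans into one pass building the set of states present,
-- then a fixed priority check; objective: simpler.

-- ===== PORT A =====
def relevantTags : PySem.Dict String String :=
  PySem.Dict.ofList [("JL Mitglied", "mitglied"),
   ("JL Kontaktformular", "interessiert"),
   ("JL Kontakt Freundeskreis", "interessiert"),
   ("JL Mitmachen", "interessiert"),
   ("JL Lernnetz", "lernnetz")]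

-- 'tag in relevant_tags.keys() and relevant_tags[tag] == st' (the [tag] lookup is only reached when present)
def tagHasState (tag st : String) : Bool :=
  match PySem.Dict.get? relevantTags tag with
  | some v => v == st
  | none => false

def assign_state (tags : List String) : String :=
  let tagSet := tags.filter (fun tag => tagHasState tag "mitglied")
  if tagSet.length ≠ 0 then "mitglied"
  else
    let tagSet := tags.filter (fun tag => tagHasState tag "interessiert")
    if tagSet.length ≠ 0 then "interessiert"
    else "sonstiges"

-- ===== PORT B =====
-- loop body: 'if tag in relevant_tags: states.add(relevant_tags[tag])'
def addState (s : PySem.Set String) (tag : String) : PySem.Set String :=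
  match PySem.Dict.get? relevantTags tag with
  | some v => PySem.Set.add s v
  | none => s

def assign_state_alt (tags : List String) : String :=
  let states : PySem.Set String := tags.foldl addState PySem.Set.empty
  if PySem.Set.contains states "mitglied" then "mitglied"
  else if PySem.Set.contains states "interessiert" then "interessiert"
  else "sonstiges"

-- ===== PRECONDITION & SPEC =====
def Spec_assign_state (tags : List String) (out : String) : Prop := out = assign_state_alt tags
instance (tags : List String) (out : String) : Decidable (Spec_assign_state tags out) := by unfold Spec_assign_state; infer_instance

-- ===== CLAIM (what is proved, stated in full; the proofs are below) =====
def Claim_equal_assign_state : Prop := ∀ (tags : List String), Dom_assign_state tags → Spec_assign_state tags (assign_state tags)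

-- ===== LEMMAS AND PROOFS =====

theorem mem_fold (tags : List String) (s : PySem.Set String) (v : String) :
    v ∈ (tags.foldl addState s)
    ↔ (v ∈ s ∨ (tags.any fun tag => tagHasState tag v) = true) := by
  induction tags generalizing s with
  | nil => simp
  | cons t ts ih =>
    simp only [List.foldl_cons, List.any_cons, ih]
    cases h : PySem.Dict.get? relevantTags t with
    | none => simp [tagHasState, addState, h]
    | some w =>
      simp only [tagHasState, addState, h, PySem.Set.mem_add, Bool.or_eq_true, beq_iff_eq]
      constructor
      · rintro (⟨hs | hw⟩ | hts)
        · exact Or.inl hs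
        · exact Or.inr (Or.inl hw.symm)
        · exact Or.inr (Or.inr hts)
      · rintro (hs | hw | hts)
        · exact Or.inl (Or.inl hs)
        · exact Or.inl (Or.inr hw.symm)
        · exact Or.inr hts

theorem any_eq_state (tags : List String) (v : String) :
    (tags.filter (fun tag => tagHasState tag v)).length ≠ 0 ↔
      (tags.any fun tag => tagHasState tag v) = true := by
  rw [Ne, List.length_eq_zero_iff, List.filter_eq_nil_iff]
  simp [List.any_eq_true]

-- ===== VERDICT (by name: the statement is the Claim_ definition above) =====
theorem assign_state_spec : Claim_equal_assign_state := by
  intro tags _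
  unfold Spec_assign_state assign_state assign_state_alt
  simp only [PySem.Set.contains, PySem.Set.empty]
  have hM := mem_fold tags [] "mitglied"
  have hI := mem_fold tags [] "interessiert"
  simp only [List.not_mem_nil, false_or] at hM hI
  simp only [any_eq_state]
  split_ifs with h1 h2 h3 h4 h5 <;> simp_all
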